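-- pv_equiv track=rewrite | github.com/PLLOG/ai-diploma-Raevskikh | src/analytics.py | build_binary_counts
-- ===== SOURCE A (Python) =====
-- def build_binary_counts(recs: list[dict], a_key: str, b_key: str) -> dict:
--     n = len(recs)
--     count_A = 0
--     count_B = 0
--     count_A_and_B = 0
--
--     for r in recs:
--         a = int(r[a_key])
--         b = int(r[b_key])
--         if a not in (0, 1) or b not in (0, 1):
--             raise ValueError("build_binary_counts: values must be 0/1")
--         if a == 1:
--             count_A += 1
--         if b == 1:
--             count_B += 1
--         if a == 1 and b == 1:
--             count_A_and_B += 1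
--
--     return {"n": n, "count_A": count_A, "count_B": count_B, "count_A_and_B": count_A_and_B}
-- ===== SOURCE B (Python) =====
-- def build_binary_counts(recs: list[dict], a_key: str, b_key: str) -> dict:
--     # Pass 1: validate each record and collect its coerced (a, b) pair.
--     pairs = []
--     for r in recs:
--         a = int(r[a_key])
--         b = int(r[b_key])
--         if a not in (0, 1) or b not in (0, 1):
--             raise ValueError("build_binary_counts: values must be 0/1")
--         pairs.append((a, b))
--     # Pass 2: contingency-table counts of the four combinations, then derive the answers.
--     c01 = pairs.count((0, 1))
--     c10 = pairs.count((1, 0))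
--     c11 = pairs.count((1, 1))
--     return {
--         "n": len(recs),
--         "count_A": c10 + c11,
--         "count_B": c01 + c11,
--         "count_A_and_B": c11,
--     }
-- ===== Notes on version B (the rewrite author's own statement) =====
-- stated objective: alternative
-- what changed: B first collects the validated (a,b) pairs, then derives the three answers from the contingency-table counts of the pair combinations (count_A = c10+c11, count_B = c01+c11, count_A_and_B = c11) instead of maintaining three running scalar counters inside the loop.
import Mathlib
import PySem

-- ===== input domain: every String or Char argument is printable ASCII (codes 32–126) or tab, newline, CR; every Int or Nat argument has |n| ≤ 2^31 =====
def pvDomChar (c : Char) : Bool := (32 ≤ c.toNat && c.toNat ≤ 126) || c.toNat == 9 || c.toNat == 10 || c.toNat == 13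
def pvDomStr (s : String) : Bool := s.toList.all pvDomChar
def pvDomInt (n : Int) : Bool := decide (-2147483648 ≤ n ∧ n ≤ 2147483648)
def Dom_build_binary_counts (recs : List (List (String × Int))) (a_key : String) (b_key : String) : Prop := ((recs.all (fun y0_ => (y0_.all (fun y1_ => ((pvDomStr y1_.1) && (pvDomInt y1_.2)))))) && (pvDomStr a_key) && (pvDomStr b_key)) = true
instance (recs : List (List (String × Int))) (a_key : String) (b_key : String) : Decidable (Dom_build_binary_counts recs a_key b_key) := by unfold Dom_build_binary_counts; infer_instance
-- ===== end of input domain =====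

-- B derives the three answers from contingency-table counts of the collected (a,b) pairs
-- instead of A's three running scalar counters (objective: alternative decomposition).

-- ===== PORT A =====
-- r[a_key] (KeyError) and values outside {0,1} (ValueError) are excluded by Pre_,
-- so the raising paths are represented by the (unreachable) default 0.
def build_binary_counts (recs : List (List (String × Int))) (a_key : String) (b_key : String) : List (String × Int) :=
  let n : Int := recs.length
  let s := recs.foldl (fun (st : Int × Int × Int) r =>
      let a : Int := (r.lookup a_key).getD 0
      let b : Int := (r.lookup b_key).getD 0
      let cA := if a = 1 then st.1 + 1 else st.1
      let cB := if b = 1 then st.2.1 + 1 else st.2.1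
      let cAB := if a = 1 ∧ b = 1 then st.2.2 + 1 else st.2.2
      (cA, cB, cAB)) (0, 0, 0)
  [("n", n), ("count_A", s.1), ("count_B", s.2.1), ("count_A_and_B", s.2.2)]

-- ===== PORT B =====
-- pass 1: collect the validated (a,b) pair of every record (raising paths excluded by Pre_);
-- pass 2: count the combinations and derive the answers.
def build_binary_counts_alt (recs : List (List (String × Int))) (a_key : String) (b_key : String) : List (String × Int) :=
  let pairs : List (Int × Int) :=
    recs.map (fun r => ((r.lookup a_key).getD 0, (r.lookup b_key).getD 0))
  let c01 : Int := PySem.List.count pairs (0, 1)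
  let c10 : Int := PySem.List.count pairs (1, 0)
  let c11 : Int := PySem.List.count pairs (1, 1)
  [("n", (recs.length : Int)), ("count_A", c10 + c11), ("count_B", c01 + c11), ("count_A_and_B", c11)]

-- ===== PRECONDITION & SPEC =====
-- Pre_: in every record both keys are present (first match) with value 0 or 1 —
-- exactly the inputs where A neither raises KeyError nor ValueError.
def Pre_build_binary_counts (recs : List (List (String × Int))) (a_key : String) (b_key : String) : Prop :=
  ∀ r ∈ recs,
    (r.lookup a_key = some 0 ∨ r.lookup a_key = some 1) ∧
    (r.lookup b_key = some 0 ∨ r.lookup b_key = some 1)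
instance (recs : List (List (String × Int))) (a_key : String) (b_key : String) : Decidable (Pre_build_binary_counts recs a_key b_key) := by unfold Pre_build_binary_counts; infer_instance

def pvWitness_build_binary_counts : (List (List (String × Int))) × String × String :=
  ([[("a", 1), ("b", 0)], [("a", 1), ("b", 1)]], "a", "b")

def Spec_build_binary_counts (recs : List (List (String × Int))) (a_key : String) (b_key : String) (out : List (String × Int)) : Prop := out = build_binary_counts_alt recs a_key b_key
instance (recs : List (List (String × Int))) (a_key : String) (b_key : String) (out : List (String × Int)) : Decidable (Spec_build_binary_counts recs a_key b_key out) := by unfold Spec_build_binary_counts; infer_instance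

-- ===== CLAIM (what is proved, stated in full; the proofs are below) =====
def Claim_equal_build_binary_counts : Prop := ∀ (recs : List (List (String × Int))) (a_key : String) (b_key : String), Dom_build_binary_counts recs a_key b_key → Pre_build_binary_counts recs a_key b_key → Spec_build_binary_counts recs a_key b_key (build_binary_counts recs a_key b_key)

-- ===== LEMMAS AND PROOFS =====

-- A's counting loop, started from any accumulator, adds exactly the contingency-table counts.
lemma bbc_fold_eq (a_key b_key : String) :
    ∀ (recs : List (List (String × Int))) (cA cB cAB : Int),
      (∀ r ∈ recs,
        ((r.lookup a_key).getD 0 = 0 ∨ (r.lookup a_key).getD 0 = 1) ∧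
        ((r.lookup b_key).getD 0 = 0 ∨ (r.lookup b_key).getD 0 = 1)) →
      recs.foldl (fun (st : Int × Int × Int) r =>
        let a : Int := (r.lookup a_key).getD 0
        let b : Int := (r.lookup b_key).getD 0
        let cA := if a = 1 then st.1 + 1 else st.1
        let cB := if b = 1 then st.2.1 + 1 else st.2.1
        let cAB := if a = 1 ∧ b = 1 then st.2.2 + 1 else st.2.2
        (cA, cB, cAB)) (cA, cB, cAB) =
      (cA + ((recs.map (fun r => ((r.lookup a_key).getD 0, (r.lookup b_key).getD 0))).count (1, 0) : Int)
          + ((recs.map (fun r => ((r.lookup a_key).getD 0, (r.lookup b_key).getD 0))).count (1, 1) : Int),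
       cB + ((recs.map (fun r => ((r.lookup a_key).getD 0, (r.lookup b_key).getD 0))).count (0, 1) : Int)
          + ((recs.map (fun r => ((r.lookup a_key).getD 0, (r.lookup b_key).getD 0))).count (1, 1) : Int),
       cAB + ((recs.map (fun r => ((r.lookup a_key).getD 0, (r.lookup b_key).getD 0))).count (1, 1) : Int)) := by
  intro recs
  induction recs with
  | nil => intro cA cB cAB _; simp
  | cons r rest ih =>
    intro cA cB cAB h
    have hr := h r (List.mem_cons_self ..)
    have hrest : ∀ x ∈ rest, _ := fun x hx => h x (List.mem_cons_of_mem r hx)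
    obtain ⟨ha, hb⟩ := hr
    simp only [List.foldl_cons, List.map_cons, List.count_cons]
    rw [ih _ _ _ hrest]
    rcases ha with ha | ha <;> rcases hb with hb | hb <;>
      simp [ha, hb, Prod.ext_iff] <;> push_cast <;> try ring
    exact ⟨trivial, trivial, trivial⟩

-- ===== VERDICT (by name: the statement is the Claim_ definition above) =====
theorem build_binary_counts_spec : Claim_equal_build_binary_counts := by
  intro recs a_key b_key _ hpre
  unfold Spec_build_binary_counts build_binary_counts build_binary_counts_alt
  have h : ∀ r ∈ recs,
      ((r.lookup a_key).getD 0 = 0 ∨ (r.lookup a_key).getD 0 = 1) ∧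
      ((r.lookup b_key).getD 0 = 0 ∨ (r.lookup b_key).getD 0 = 1) := by
    intro r hr
    obtain ⟨ha, hb⟩ := hpre r hr
    constructor
    · rcases ha with ha | ha <;> simp [ha]
    · rcases hb with hb | hb <;> simp [hb]
  rw [bbc_fold_eq a_key b_key recs 0 0 0 h]
  simp [PySem.List.count_eq]
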